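-- pv_equiv track=rewrite | github.com/asandhare/CS | bm.py | small_l_prime_array
-- ===== SOURCE A (Python) =====
-- def small_l_prime_array(n): #LP array compilation
--     small_lpa = [0] * len(n)
--     for i in range(len(n)):
--         if n[i] == i+1:  # prefix matching a suffix
--             small_lpa[len(n)-i-1] = i+1
--     for i in range(len(n)-2, -1, -1):  # shift to the left
--         if small_lpa[i] == 0:
--             small_lpa[i] = small_lpa[i+1]
--     return small_lpa
-- ===== SOURCE B (Python) =====
-- def small_l_prime_array(n):
--     # One forward sweep with a running carry, built right-to-left by a final reverse.
--     acc = []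
--     carry = 0
--     for i, x in enumerate(n):
--         if x == i + 1:
--             carry = i + 1
--         acc.append(carry)
--     acc.reverse()
--     return acc
-- ===== Notes on version B (the rewrite author's own statement) =====
-- stated objective: simpler
-- what changed: A scatters marks into a zero array and then runs a second backward pass filling zeros from the right neighbour; B computes the same values in a single forward sweep with a running carry and one final reverse.
import Mathlib
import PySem

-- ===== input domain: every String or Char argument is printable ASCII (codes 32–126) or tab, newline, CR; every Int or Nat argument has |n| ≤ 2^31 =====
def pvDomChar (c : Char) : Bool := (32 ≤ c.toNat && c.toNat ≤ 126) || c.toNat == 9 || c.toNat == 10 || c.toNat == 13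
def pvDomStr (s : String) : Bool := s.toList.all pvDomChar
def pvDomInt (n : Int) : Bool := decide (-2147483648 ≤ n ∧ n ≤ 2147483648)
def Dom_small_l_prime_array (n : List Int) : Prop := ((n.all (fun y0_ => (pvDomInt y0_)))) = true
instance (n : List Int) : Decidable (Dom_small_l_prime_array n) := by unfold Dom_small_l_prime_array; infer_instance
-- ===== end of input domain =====

-- B replaces A's two passes (scatter into a zero array, then a backward zero-filling pass)
-- by one forward sweep with a running carry followed by a reverse; objective: simpler, same cost.

-- ===== PORT A =====
-- loop 1: 'for i in range(len(n)): if n[i] == i+1: small_lpa[len(n)-i-1] = i+1'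
-- n[i] is always in range here, so n.getD i 0 is exact.
-- loop 2: 'for i in range(len(n)-2, -1, -1): …' — the index sequence len(n)-2, …, 0
-- is (List.range (len(n)-1)).reverse; all reads s[i], s[i+1] are in range, getD is exact.
def small_l_prime_array (n : List Int) : List Int :=
  let L := n.length
  let s0 : List Int := List.replicate L 0
  let s1 := (List.range L).foldl
    (fun s i => if n.getD i 0 = (i : Int) + 1 then s.set (L - i - 1) ((i : Int) + 1) else s) s0
  ((List.range (L - 1)).reverse).foldl
    (fun s i => if s.getD i 0 = 0 then s.set i (s.getD (i + 1) 0) else s) s1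

-- ===== PORT B =====
-- 'for i, x in enumerate(n): if x == i+1: carry = i+1; acc.append(carry)' then acc.reverse()
def small_l_prime_array_alt (n : List Int) : List Int :=
  let r := (PySem.List.enumerate n).foldl
    (fun (st : Int × List Int) p =>
      let c := if p.2 = p.1 + 1 then p.1 + 1 else st.1
      (c, st.2 ++ [c])) (0, [])
  r.2.reverse

-- ===== PRECONDITION & SPEC =====
def Spec_small_l_prime_array (n : List Int) (out : List Int) : Prop := out = small_l_prime_array_alt n
instance (n : List Int) (out : List Int) : Decidable (Spec_small_l_prime_array n out) := by unfold Spec_small_l_prime_array; infer_instance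

-- ===== CLAIM (what is proved, stated in full; the proofs are below) =====
def Claim_equal_small_l_prime_array : Prop := ∀ (n : List Int), Dom_small_l_prime_array n → Spec_small_l_prime_array n (small_l_prime_array n)

-- ===== LEMMAS AND PROOFS =====

-- backward zero-filling pass, as a recursion: a zero cell takes the (already processed)
-- value of its right neighbour; `b` is the value just beyond the right end of the segment.
def propB (b : Int) : List Int → List Int
  | [] => []
  | x :: rest =>
    let r := propB b rest
    (if x = 0 then r.headD b else x) :: r

-- forward carry scan over the enumerated list (index as Int, as PySem.List.enumerate gives)
def scanC (c : Int) : List (Int × Int) → List Int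
  | [] => []
  | p :: t =>
    let c' := if p.2 = p.1 + 1 then p.1 + 1 else c
    c' :: scanC c' t

theorem headD_append_singleton (u : List Int) (a c : Int) :
    (u ++ [a]).headD c = u.headD a := by
  cases u <;> simp

theorem propB_append_singleton (c a : Int) (l : List Int) :
    propB c (l ++ [a]) = propB (if a = 0 then c else a) l ++ [if a = 0 then c else a] := by
  induction l with
  | nil => simp [propB]
  | cons x rest ih =>
    simp only [List.cons_append, propB, ih, headD_append_singleton]

theorem propB_reverse_map_eq_scanC (t : List (Int × Int)) (c : Int)
    (ht : ∀ p ∈ t, 0 ≤ p.1) :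
    propB c ((t.map (fun p => if p.2 = p.1 + 1 then p.1 + 1 else 0)).reverse)
      = (scanC c t).reverse := by
  induction t generalizing c with
  | nil => simp [propB, scanC]
  | cons p t ih =>
    have hp : (0:Int) ≤ p.1 := ht p (List.mem_cons_self ..)
    have ht' : ∀ q ∈ t, (0:Int) ≤ q.1 := fun q hq => ht q (List.mem_cons_of_mem _ hq)
    simp only [List.map_cons, List.reverse_cons, propB_append_singleton, scanC, ih _ ht']
    by_cases h : p.2 = p.1 + 1
    · have h1 : ¬ ((p.1 : Int) + 1 = 0) := by omega
      simp [h, h1]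
    · simp [h]

theorem set_append_len (A : List Int) (b : Int) (rest : List Int) (v : Int) :
    (A ++ b :: rest).set A.length v = A ++ v :: rest := by
  induction A with
  | nil => simp
  | cons x A ih => simp [ih]

-- loop 1 produces the reverse of the pointwise "prefix marks" list
theorem loop1_eq (n : List Int) (k : Nat) (hk : k ≤ n.length) :
    (List.range k).foldl
      (fun s i => if n.getD i 0 = (i : Int) + 1 then s.set (n.length - i - 1) ((i : Int) + 1) else s)
      (List.replicate n.length 0)
    = List.replicate (n.length - k) 0 ++
      ((List.range k).map (fun i => if n.getD i 0 = (i : Int) + 1 then (i : Int) + 1 else (0:Int))).reverse := by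
  induction k with
  | zero => simp
  | succ k ih =>
    have hk : k ≤ n.length := Nat.le_of_succ_le hk
    have h1 : n.length - k = (n.length - k - 1) + 1 := by omega
    rw [List.range_succ, List.foldl_append, ih hk]
    by_cases hc : n.getD k 0 = (k : Int) + 1
    · simp only [List.foldl_cons, List.foldl_nil, hc, if_pos, Nat.sub_sub]
      rw [h1, List.replicate_succ', List.append_assoc, List.singleton_append]
      have h3 : n.length - (k + 1) = (List.replicate (n.length - k - 1) (0:Int)).length := by
        simp; omega
      rw [h3, set_append_len]
      simp only [List.getD_eq_getElem?_getD] at hc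
      simp [hc]
    · simp only [List.foldl_cons, List.foldl_nil, hc, if_false]
      rw [h1, List.replicate_succ', List.append_assoc]
      simp only [List.getD_eq_getElem?_getD] at hc
      simp [hc, Nat.sub_sub]

-- loop 2 over indices m, m-1, …, 0 equals propB on the first m+1 cells with base s[m+1]
theorem loop2_eq (m : Nat) (s : List Int) (hs : m + 2 ≤ s.length) :
    ((List.range (m + 1)).reverse).foldl
      (fun s i => if s.getD i 0 = 0 then s.set i (s.getD (i + 1) 0) else s) s
    = propB (s.getD (m + 1) 0) (s.take (m + 1)) ++ s.drop (m + 1) := by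
  induction m generalizing s with
  | zero =>
    match s, hs with
    | a :: b :: rest, _ =>
      by_cases ha : a = (0:Int) <;>
        simp [List.range_succ, propB, ha]
  | succ m ih =>
    have hm1 : m + 1 < s.length := by omega
    have hm2 : m + 2 < s.length := by omega
    rw [List.range_succ, List.reverse_append, List.reverse_singleton, List.singleton_append,
      List.foldl_cons]
    set s' := if s.getD (m + 1) 0 = 0 then s.set (m + 1) (s.getD (m + 1 + 1) 0) else s with hs'
    have hlen' : s'.length = s.length := by
      rw [hs']; split <;> simp
    have hs2 : m + 2 ≤ s'.length := by omega
    rw [ih s' hs2]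
    set v : Int := if s.getD (m + 1) 0 = 0 then s.getD (m + 1 + 1) 0 else s.getD (m + 1) 0 with hv
    have c1 : s'.getD (m + 1) 0 = v := by
      rw [hs', hv]; split <;>
        simp [List.getD_eq_getElem?_getD, hm1]
    have c2 : s'.take (m + 1) = s.take (m + 1) := by
      rw [hs']; split
      · rw [List.take_set]
        apply List.set_eq_of_length_le
        simp
      · rfl
    have c3 : s'.drop (m + 1) = v :: s.drop (m + 2) := by
      rw [hs', hv]; split <;> rename_i hz
      · rw [List.drop_set]
        rw [List.drop_eq_getElem_cons hm1]
        simp only [Nat.sub_self, List.set_cons_zero]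
        simp
      · rw [List.drop_eq_getElem_cons hm1]
        have : s.getD (m + 1) 0 = s[m + 1] := by
          simp [List.getD_eq_getElem?_getD, List.getElem?_eq_getElem hm1]
        rw [this]
    rw [c1, c2, c3]
    have htake : s.take (m + 1 + 1) = s.take (m + 1) ++ [s.getD (m + 1) 0] := by
      rw [List.take_add_one]
      simp [List.getD_eq_getElem?_getD, List.getElem?_eq_getElem hm1]
    rw [htake, propB_append_singleton, ← hv]
    have hdrop : s.drop (m + 1 + 1) = s.drop (m + 2) := rfl
    rw [hdrop, List.append_assoc, List.singleton_append]

theorem loop2_propB (s : List Int) :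
    ((List.range (s.length - 1)).reverse).foldl
      (fun s i => if s.getD i 0 = 0 then s.set i (s.getD (i + 1) 0) else s) s
    = propB 0 s := by
  match s with
  | [] => simp [propB]
  | [a] => by_cases ha : a = (0:Int) <;> simp [propB, ha]
  | a :: b :: rest =>
    have hlen : (a :: b :: rest).length - 1 = rest.length + 1 := by simp
    rw [hlen, loop2_eq rest.length _ (by simp)]
    set m := rest.length with hm
    have hm1 : m + 1 < (a :: b :: rest).length := by simp [hm]
    have hdrop : (a :: b :: rest).drop (m + 1) = [(a :: b :: rest)[m + 1]] := by
      rw [List.drop_eq_getElem_cons hm1]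
      congr 1
      apply List.drop_eq_nil_of_le
      simp [hm]
    have hsplit : a :: b :: rest = (a :: b :: rest).take (m + 1) ++ [(a :: b :: rest)[m + 1]] := by
      conv_lhs => rw [← List.take_append_drop (m + 1) (a :: b :: rest)]
      rw [hdrop]
    have hgetD : (a :: b :: rest).getD (m + 1) 0 = (a :: b :: rest)[m + 1] := by
      simp [List.getD_eq_getElem?_getD, List.getElem?_eq_getElem hm1]
    rw [hgetD, hdrop]
    conv_rhs => rw [hsplit]
    rw [propB_append_singleton]
    by_cases hz : (a :: b :: rest)[m + 1] = (0:Int)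
    · rw [if_pos hz, hz]
    · rw [if_neg hz]

theorem map_range_eq_map_enumerate (n : List Int) :
    (List.range n.length).map (fun i => if n.getD i 0 = (i : Int) + 1 then (i : Int) + 1 else (0:Int))
    = (PySem.List.enumerate n).map (fun p => if p.2 = p.1 + 1 then p.1 + 1 else 0) := by
  apply List.ext_getElem
  · simp [PySem.List.length_enumerate]
  · intro k h1 h2
    simp only [List.getElem_map, List.getElem_range, PySem.List.getElem_enumerate]
    have hk : k < n.length := by simpa [PySem.List.length_enumerate] using h2
    simp [List.getD_eq_getElem?_getD, List.getElem?_eq_getElem hk]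

theorem foldl_acc_scanC (t : List (Int × Int)) (c : Int) (acc : List Int) :
    (t.foldl (fun (st : Int × List Int) p =>
        let c' := if p.2 = p.1 + 1 then p.1 + 1 else st.1
        (c', st.2 ++ [c'])) (c, acc)).2 = acc ++ scanC c t := by
  induction t generalizing c acc with
  | nil => simp [scanC]
  | cons p t ih => simp [scanC, ih]

-- ===== VERDICT (by name: the statement is the Claim_ definition above) =====
theorem small_l_prime_array_spec : Claim_equal_small_l_prime_array := by
  intro n _
  unfold Spec_small_l_prime_array small_l_prime_array small_l_prime_array_alt
  simp only
  rw [loop1_eq n n.length (le_refl _)]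
  simp only [Nat.sub_self, List.replicate_zero, List.nil_append]
  rw [map_range_eq_map_enumerate]
  have hlen : ((PySem.List.enumerate n).map
      (fun p => if p.2 = p.1 + 1 then p.1 + 1 else (0:Int))).reverse.length = n.length := by
    simp [PySem.List.length_enumerate]
  rw [← hlen, loop2_propB,
    propB_reverse_map_eq_scanC _ _ (fun p hp => by
      obtain ⟨k, hk, rfl⟩ := (PySem.List.mem_enumerate_iff _ _ _).1 hp
      simp),
    foldl_acc_scanC]
  simp
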